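-- pv_equiv track=rewrite | github.com/eddiemo/ATDS | Extentions.py | buildalgextention
-- ===== SOURCE A (Python) =====
-- def next(polynom, m):
--     new = []
--     new.extend(polynom)
--     for i in range(len(new)):
--         if new[i] == m - 1:
--             new[i] = 0
--         else:
--             new[i] += 1
--             break
--     return new
--
-- def buildalgextention(mx, m):
--     field = []
--     n = len(mx) - 1
--     cnt = pow(m, n)
--     initpol = [0] * (n + 1)
--     for i in range(cnt):
--         initdeg = len(initpol) - 1
--         field.append(initpol)
--         initpol = next(initpol, m)
--     return field
-- ===== SOURCE B (Python) =====
-- def buildalgextention(mx, m):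
--     n = len(mx) - 1
--     vecs = [[]]
--     for _ in range(n):
--         vecs = [v + [d] for d in range(m) for v in vecs]
--     return [v + [0] for v in vecs]
-- ===== Notes on version B (the rewrite author's own statement) =====
-- stated objective: simpler
-- what changed: replaces the stateful odometer (a shared increment-with-carry-and-break list mutated across iterations) by a recursive cartesian construction that extends the whole set of vectors one digit position at a time and pads a trailing 0
-- intended difference: for m <= -1 with odd len(mx) >= 3, A returns m^(len(mx)-1) vectors [i,0,...,0] because its carry test new[i]==m-1 can never fire for negative m, while B returns [] since range(m) holds no digits; the empty enumeration is the intended value for a base with no digits. — e.g. on buildalgextention([0, 0, 0], -2): A returns [[0, 0, 0], [1, 0, 0], [2, 0, 0], [3, 0, 0]], B returns []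
import Mathlib
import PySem

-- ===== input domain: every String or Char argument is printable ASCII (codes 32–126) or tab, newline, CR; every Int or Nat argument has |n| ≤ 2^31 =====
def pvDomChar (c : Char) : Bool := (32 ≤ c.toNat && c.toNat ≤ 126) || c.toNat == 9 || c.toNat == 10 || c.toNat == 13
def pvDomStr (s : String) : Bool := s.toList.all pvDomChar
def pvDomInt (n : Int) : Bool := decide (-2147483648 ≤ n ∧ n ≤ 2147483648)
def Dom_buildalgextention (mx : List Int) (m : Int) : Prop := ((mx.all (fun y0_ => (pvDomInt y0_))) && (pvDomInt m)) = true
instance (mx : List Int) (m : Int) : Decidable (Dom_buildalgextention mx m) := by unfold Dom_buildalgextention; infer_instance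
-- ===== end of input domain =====

-- Header: B builds the set of vectors by a cartesian digit-by-digit construction instead of A's
-- mutated odometer; on negative m with odd len(mx) ≥ 3 B intentionally returns [] (see D_ below).

-- ===== PORT A =====
-- Python `next`: copy, then scan with in-place update and break ≡ this structural recursion.
def pyNext (polynom : List Int) (m : Int) : List Int :=
  match polynom with
  | [] => []
  | x :: rest => if x = m - 1 then 0 :: pyNext rest m else (x + 1) :: rest

def buildalgextention (mx : List Int) (m : Int) : List (List Int) :=
  let n : Int := (mx.length : Int) - 1
  let cnt : Int := m ^ n.toNat            -- pow(m, n); n ≥ 0 on Pre_ (mx ≠ [])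
  let initpol : List Int := List.replicate ((n + 1).toNat) 0
  ((List.range cnt.toNat).foldl           -- range(cnt): empty when cnt < 0
    (fun (st : List (List Int) × List Int) _ => (st.1 ++ [st.2], pyNext st.2 m))
    ([], initpol)).1

-- ===== PORT B =====
def buildalgextention_alt (mx : List Int) (m : Int) : List (List Int) :=
  let n : Int := (mx.length : Int) - 1
  let vecs : List (List Int) :=
    (List.range n.toNat).foldl
      (fun acc _ =>
        ((PySem.List.pyRange 0 m 1).map (fun d => acc.map (fun v => v ++ [d]))).flatten)
      [[]]
  vecs.map (fun v => v ++ [0])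

-- ===== PRECONDITION & SPEC =====
-- Pre_ excludes only empty mx, on which A raises (pow(m, -1) gives a float, so range() raises
-- TypeError; ZeroDivisionError for m = 0).
def Pre_buildalgextention (mx : List Int) (m : Int) : Prop := mx ≠ []
instance (mx : List Int) (m : Int) : Decidable (Pre_buildalgextention mx m) := by
  unfold Pre_buildalgextention; infer_instance
def pvWitness_buildalgextention : List Int × Int := ([0, 0], 2)

-- For m ≤ -1 with odd len(mx) ≥ 3, A returns m^(len(mx)-1) vectors [i,0,...,0] because its carry
-- test new[i]==m-1 can never fire for negative m, while B returns []: range(m) holds no digits,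
-- and the empty enumeration is the intended value for a base with no digits.
def D_buildalgextention (mx : List Int) (m : Int) : Prop :=
  m ≤ -1 ∧ 3 ≤ mx.length ∧ mx.length % 2 = 1
instance (mx : List Int) (m : Int) : Decidable (D_buildalgextention mx m) := by
  unfold D_buildalgextention; infer_instance

def Spec_buildalgextention (mx : List Int) (m : Int) (out : List (List Int)) : Prop :=
  ¬ D_buildalgextention mx m → out = buildalgextention_alt mx m
instance (mx : List Int) (m : Int) (out : List (List Int)) :
    Decidable (Spec_buildalgextention mx m out) := by
  unfold Spec_buildalgextention; infer_instance

def pvDiffWitness_buildalgextention : List Int × Int := ([0, 0, 0], -2)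
def pvDiffWitnessOut_buildalgextention : (List (List Int)) × (List (List Int)) :=
  ([[0, 0, 0], [1, 0, 0], [2, 0, 0], [3, 0, 0]], [])

-- ===== CLAIM (what is proved, stated in full; the proofs are below) =====
def Claim_unchanged_buildalgextention : Prop := ∀ (mx : List Int) (m : Int),
  Dom_buildalgextention mx m → Pre_buildalgextention mx m →
  Spec_buildalgextention mx m (buildalgextention mx m)
def Claim_changed_buildalgextention : Prop :=
  Dom_buildalgextention (pvDiffWitness_buildalgextention.1) (pvDiffWitness_buildalgextention.2) ∧
  Pre_buildalgextention (pvDiffWitness_buildalgextention.1) (pvDiffWitness_buildalgextention.2) ∧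
  D_buildalgextention (pvDiffWitness_buildalgextention.1) (pvDiffWitness_buildalgextention.2) ∧
  buildalgextention (pvDiffWitness_buildalgextention.1) (pvDiffWitness_buildalgextention.2) = pvDiffWitnessOut_buildalgextention.1 ∧
  buildalgextention_alt (pvDiffWitness_buildalgextention.1) (pvDiffWitness_buildalgextention.2) = pvDiffWitnessOut_buildalgextention.2 ∧
  pvDiffWitnessOut_buildalgextention.1 ≠ pvDiffWitnessOut_buildalgextention.2
def Claim_exact_buildalgextention : Prop := ∀ (mx : List Int) (m : Int),
  Dom_buildalgextention mx m → Pre_buildalgextention mx m → D_buildalgextention mx m →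
  buildalgextention mx m ≠ buildalgextention_alt mx m

-- ===== LEMMAS AND PROOFS =====

-- Little-endian base-m digits of i, padded to length k.
def dig : Nat → Nat → Nat → List Int
  | 0, _, _ => []
  | k + 1, m, i => ((i % m : Nat) : Int) :: dig k m (i / m)

theorem dig_zero (k m : Nat) : dig k m 0 = List.replicate k 0 := by
  induction k with
  | zero => rfl
  | succ k ih => simp [dig, ih, List.replicate_succ]

theorem dig_succ (k m i : Nat) :
    dig (k + 1) m i = ((i % m : Nat) : Int) :: dig k m (i / m) := rfl

theorem pyNext_dig (m : Nat) (hm : 1 ≤ m) :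
    ∀ (k i : Nat), i + 1 ≤ m ^ k → pyNext (dig k m i) (m : Int) = dig k m (i + 1) := by
  intro k
  induction k with
  | zero => intro i hi; simp [dig, pyNext]
  | succ k ih =>
    intro i hi
    have hq : m * (i / m) + i % m = i := Nat.div_add_mod i m
    have hr : i % m < m := Nat.mod_lt _ hm
    rw [dig_succ k m i, dig_succ k m (i + 1)]
    by_cases hcase : i % m = m - 1
    · -- carry
      have hi1 : i + 1 = (i / m + 1) * m := by
        have h2 : (i / m + 1) * m = m * (i / m) + m := by ring
        omega
      have hmod : (i + 1) % m = 0 := by rw [hi1]; exact Nat.mul_mod_left _ _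
      have hdiv : (i + 1) / m = i / m + 1 := by
        rw [hi1]; exact Nat.mul_div_cancel (i / m + 1) (by omega)
      have hlast : i / m + 1 ≤ m ^ k := by
        have h3 : (i / m + 1) * m ≤ m ^ k * m := by
          rw [← hi1, ← pow_succ]; exact hi
        exact Nat.le_of_mul_le_mul_right h3 hm
      have hcond : ((i % m : Nat) : Int) = (m : Int) - 1 := by
        rw [hcase]; omega
      simp only [pyNext]
      rw [if_pos hcond, hmod, hdiv, ih _ (by omega)]
      simp
    · -- no carry
      have hrlt : i % m + 1 < m := by omega
      have hrep : i + 1 = (i % m + 1) + (i / m) * m := by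
        have h2 : (i / m) * m = m * (i / m) := by ring
        omega
      have hmod : (i + 1) % m = i % m + 1 := by
        rw [hrep, Nat.add_mul_mod_self_right, Nat.mod_eq_of_lt hrlt]
      have hdiv : (i + 1) / m = i / m := by
        rw [hrep, Nat.add_mul_div_right _ _ hm, Nat.div_eq_of_lt hrlt, Nat.zero_add]
      have hcond : ¬ ((i % m : Nat) : Int) = (m : Int) - 1 := by
        intro h; apply hcase; omega
      simp only [pyNext]
      rw [if_neg hcond, hmod, hdiv]
      push_cast
      ring_nf

-- i below m^k means a 0 top digit.
theorem dig_pad (m : Nat) (hm : 1 ≤ m) :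
    ∀ (k i : Nat), i < m ^ k → dig (k + 1) m i = dig k m i ++ [0] := by
  intro k
  induction k with
  | zero =>
    intro i hi
    have hi0 : i = 0 := by simpa using hi
    simp [hi0, dig]
  | succ k ih =>
    intro i hi
    have hdiv : i / m < m ^ k := by
      apply Nat.div_lt_of_lt_mul
      calc i < m ^ (k + 1) := hi
        _ = m * m ^ k := by ring
    rw [dig_succ (k + 1) m i, dig_succ k m i, ih _ hdiv]
    simp

-- appending a high digit d to every i < m^k.
theorem dig_high (m : Nat) (hm : 1 ≤ m) (d : Nat) (hd : d < m) :
    ∀ (k i : Nat), i < m ^ k → dig (k + 1) m (i + d * m ^ k) = dig k m i ++ [(d : Int)] := by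
  intro k
  induction k with
  | zero =>
    intro i hi
    have hi0 : i = 0 := by simpa using hi
    subst hi0
    simp [dig, Nat.mod_eq_of_lt hd, Nat.div_eq_of_lt hd]
  | succ k ih =>
    intro i hi
    have hidiv : i / m < m ^ k := by
      apply Nat.div_lt_of_lt_mul
      calc i < m ^ (k + 1) := hi
        _ = m * m ^ k := by ring
    rw [show i + d * m ^ (k + 1) = i + d * m ^ k * m from by ring]
    rw [dig_succ (k + 1) m (i + d * m ^ k * m), dig_succ k m i]
    rw [Nat.add_mul_mod_self_right, Nat.add_mul_div_right _ _ hm, ih _ hidiv]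
    simp

-- A's loop invariant.
theorem foldA (m : Nat) (hm : 1 ≤ m) (k : Nat) :
    ∀ (c j : Nat) (F : List (List Int)), j + c ≤ m ^ k →
    (List.range c).foldl
      (fun (st : List (List Int) × List Int) _ => (st.1 ++ [st.2], pyNext st.2 (m : Int)))
      (F, dig k m j)
    = (F ++ (List.range c).map (fun t => dig k m (j + t)), dig k m (j + c)) := by
  intro c
  induction c with
  | zero => intro j F h; simp
  | succ c ih =>
    intro j F h
    rw [List.range_succ, List.foldl_append, ih j F (by omega)]
    simp only [List.foldl_cons, List.foldl_nil]
    rw [pyNext_dig m hm k (j + c) (by omega)]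
    rw [Nat.add_assoc]
    simp [List.map_append, List.append_assoc]

-- length of A's accumulated field.
theorem foldA_len (m : Int) :
    ∀ (c : Nat) (st : List (List Int) × List Int),
    (((List.range c).foldl
      (fun (st : List (List Int) × List Int) _ => (st.1 ++ [st.2], pyNext st.2 m)) st).1).length
    = st.1.length + c := by
  intro c
  induction c with
  | zero => intro st; simp
  | succ c ih =>
    intro st
    rw [List.range_succ, List.foldl_append, List.foldl_cons, List.foldl_nil]
    simp [ih]
    omega

-- block decomposition of a range.
theorem range_mul_map {α : Type} (g : Nat → α) (s : Nat) :
    ∀ a : Nat, (List.range (a * s)).map g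
      = ((List.range a).map (fun d => (List.range s).map (fun i => g (d * s + i)))).flatten := by
  intro a
  induction a with
  | zero => simp
  | succ a ih =>
    have h1 : (a + 1) * s = a * s + s := by ring
    rw [h1, List.range_add, List.map_append, ih, List.range_succ, List.map_append]
    simp [List.map_map, Function.comp]

-- B's loop produces all padded digit vectors, for m ≥ 1.
theorem foldB (m : Nat) (hm : 1 ≤ m) :
    ∀ k : Nat, (List.range k).foldl
      (fun acc _ =>
        ((PySem.List.pyRange 0 (m : Int) 1).map (fun d => acc.map (fun v => v ++ [d]))).flatten)
      [[]]
    = (List.range (m ^ k)).map (dig k m) := by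
  intro k
  induction k with
  | zero => simp [dig]
  | succ k ih =>
    rw [List.range_succ, List.foldl_append, ih]
    simp only [List.foldl_cons, List.foldl_nil]
    have hpr : PySem.List.pyRange 0 (m : Int) 1 = (List.range m).map (fun d : Nat => (d : Int)) := by
      rw [PySem.List.pyRange_one]
      simp [List.map_eq_flatMap]
    rw [hpr, List.map_map]
    rw [show m ^ (k + 1) = m * m ^ k from by ring]
    rw [range_mul_map (g := dig (k + 1) m) (s := m ^ k) m]
    congr 1
    apply List.map_congr_left
    intro d hd
    rw [List.mem_range] at hd
    simp only [Function.comp, List.map_map]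
    apply List.map_congr_left
    intro i hi
    rw [List.mem_range] at hi
    simp only [Function.comp]
    rw [show d * m ^ k + i = i + d * m ^ k from by ring, dig_high m hm d hd k i hi]

-- main positive-m case
theorem main_pos (mx : List Int) (m : Int) (hmx : mx ≠ []) (hm : 1 ≤ m) :
    buildalgextention mx m = buildalgextention_alt mx m := by
  obtain ⟨L, hL⟩ : ∃ L : Nat, mx.length = L + 1 := by
    cases mx with
    | nil => exact absurd rfl hmx
    | cons a t => exact ⟨t.length, by simp⟩
  have hmnat : m = ((m.toNat : Nat) : Int) := by omega
  set M : Nat := m.toNat with hM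
  have hM1 : 1 ≤ M := by omega
  unfold buildalgextention buildalgextention_alt
  simp only [hL]
  have hn : ((((L + 1 : Nat) : Int) - 1)).toNat = L := by push_cast; omega
  have hn1 : ((((L + 1 : Nat) : Int) - 1) + 1).toNat = L + 1 := by push_cast; omega
  have hcnt : (m ^ L).toNat = M ^ L := by
    rw [hmnat, ← Nat.cast_pow, Int.toNat_natCast]
  rw [hn, hn1, hcnt]
  rw [← dig_zero (L + 1) M]
  rw [hmnat]
  rw [foldA M hM1 (L + 1) (M ^ L) 0 [] (by
    have : M ^ L ≤ M ^ (L + 1) := Nat.pow_le_pow_right hM1 (by omega)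
    omega)]
  rw [foldB M hM1 L]
  simp only [List.nil_append, List.map_map]
  apply List.map_congr_left
  intro i hi
  rw [List.mem_range] at hi
  simp only [Function.comp, Nat.zero_add]
  exact dig_pad M hM1 L i hi

-- degenerate case mx.length = 1: both return [[0]] for every m.
theorem main_len1 (mx : List Int) (m : Int) (h1 : mx.length = 1) :
    buildalgextention mx m = buildalgextention_alt mx m := by
  unfold buildalgextention buildalgextention_alt
  simp [h1]

-- B is [] when m ≤ 0 and at least one digit position is built.
theorem B_empty (mx : List Int) (m : Int) (hm : m ≤ 0) (h2 : 2 ≤ mx.length) :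
    buildalgextention_alt mx m = [] := by
  unfold buildalgextention_alt
  obtain ⟨L, hL⟩ : ∃ L : Nat, mx.length = L + 2 := ⟨mx.length - 2, by omega⟩
  have hpr : PySem.List.pyRange 0 m 1 = [] := by
    rw [PySem.List.pyRange_one, show (m - 0).toNat = 0 from by omega]
    simp
  have hn : ((((L + 2 : Nat) : Int)) - 1).toNat = L + 1 := by push_cast; omega
  simp only [hL, hn]
  rw [List.range_succ, List.foldl_append, List.foldl_cons, List.foldl_nil]
  rw [hpr]
  simp

-- A is [] when the loop count m^n is nonpositive.
theorem A_of_cnt_zero (mx : List Int) (m : Int)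
    (h : (m ^ ((((mx.length : Int)) - 1)).toNat).toNat = 0) :
    buildalgextention mx m = [] := by
  unfold buildalgextention
  simp only [h]
  simp

-- ===== VERDICT (by name: the statement is the Claim_ definition above) =====
theorem buildalgextention_spec : Claim_unchanged_buildalgextention := by
  intro mx m _ hpre
  intro hD
  unfold D_buildalgextention at hD
  by_cases hm : 1 ≤ m
  · exact main_pos mx m hpre hm
  · by_cases h1 : mx.length = 1
    · exact main_len1 mx m h1
    · -- m ≤ 0 and mx.length ≥ 2; ¬D forces mx.length even, so n = len-1 is odd
      have hlen0 : mx.length ≠ 0 := by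
        intro h; exact hpre (List.length_eq_zero_iff.mp h)
      have hlen : 2 ≤ mx.length := by omega
      rw [B_empty mx m (by omega) hlen]
      apply A_of_cnt_zero
      by_cases hm0 : m = 0
      · subst hm0
        have he : (((mx.length : Int)) - 1).toNat ≠ 0 := by omega
        rw [zero_pow he]
        rfl
      · -- m ≤ -1; ¬D gives mx.length even, so exponent odd, power negative
        have hmneg : m ≤ -1 := by omega
        have hodd : mx.length % 2 = 0 := by
          by_contra hc
          exact hD ⟨hmneg, by omega, by omega⟩
        have hoddexp : Odd (((mx.length : Int) - 1).toNat) := by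
          refine ⟨(mx.length - 2) / 2, ?_⟩
          omega
        have : m ^ ((((mx.length : Int)) - 1)).toNat < 0 :=
          Odd.pow_neg hoddexp (by omega)
        omega

theorem buildalgextention_changed : Claim_changed_buildalgextention := by
  unfold Claim_changed_buildalgextention; decide

theorem buildalgextention_tight : Claim_exact_buildalgextention := by
  intro mx m _ hpre hD
  unfold D_buildalgextention at hD
  obtain ⟨hm, hlen, hodd⟩ := hD
  rw [B_empty mx m (by omega) (by omega)]
  intro hAeq
  have hevenexp : Even (((mx.length : Int) - 1).toNat) := by
    refine ⟨(mx.length - 1) / 2, ?_⟩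
    omega
  have hpos : 0 < m ^ ((((mx.length : Int)) - 1)).toNat :=
    hevenexp.pow_pos (by omega)
  have hlenA : (buildalgextention mx m).length
      = (m ^ ((((mx.length : Int)) - 1)).toNat).toNat := by
    unfold buildalgextention
    simp only []
    rw [foldA_len]
    simp
  rw [hAeq] at hlenA
  simp only [List.length_nil] at hlenA
  omega
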